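-- pv_equiv track=rewrite | github.com/karthik-siru/practice-simple | array/stuckkeyboard.py | solve
-- ===== SOURCE A (Python) =====
-- def solve(typed, target):
--     # base case :
--     if not typed and not target:
--         return True
--
--     if not target:
--         return False
--
--     n, m = len(typed), len(target)
--
--     if n < m:
--         return False
--
--     if typed[0] != target[0]:
--         return False
--
--     i1, i2 = 0, 1
--
--     # length 1 case
--
--     if m == 1:
--         if len(set(typed)) == 1:
--             return True
--         else:
--             return False
--
--     curr = target[0]
--     next = target[i2]
--
--     while i1 < n:
--         # when curr and next are equal
--         if curr == next:
--
--             i1 += 1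
--             if i1 >= n:
--                 break
--             # less no.of curr's in typed
--             if typed[i1] != curr:
--                 return False
--             i2 += 1
--             curr = next
--             if i2 >= m:
--                 break
--             # update next
--             next = target[i2]
--             continue
--
--         if typed[i1] == curr:
--             i1 += 1
--         elif typed[i1] == next:
--             curr = next
--             i2 += 1
--             if i2 >= m:
--                 break
--             next = target[i2]
--         else:
--             return False
--     if i2 < m:
--         return False
--     # move the i1 to the end.
--     while i1 < n:
--         if typed[i1] != curr:
--             return False
--         i1 += 1
--     return True
-- ===== SOURCE B (Python) =====
-- def solve(typed, target):
--     def rle(s):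
--         runs = []
--         for c in s:
--             if runs and runs[-1][0] == c:
--                 runs[-1] = (c, runs[-1][1] + 1)
--             else:
--                 runs.append((c, 1))
--         return runs
--
--     rt, rg = rle(typed), rle(target)
--     if len(rt) != len(rg):
--         return False
--     return all(c1 == c2 and n1 >= n2 for (c1, n1), (c2, n2) in zip(rt, rg))
-- ===== Notes on version B (the rewrite author's own statement) =====
-- stated objective: simpler
-- what changed: Replaces the tangled two-pointer state machine (curr/next lookahead, break/post-loop phases, a set() special case for len(target)==1) with a run-length encoding of both strings followed by a direct run-by-run comparison (equal chars, typed count >= target count).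
import Mathlib
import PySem

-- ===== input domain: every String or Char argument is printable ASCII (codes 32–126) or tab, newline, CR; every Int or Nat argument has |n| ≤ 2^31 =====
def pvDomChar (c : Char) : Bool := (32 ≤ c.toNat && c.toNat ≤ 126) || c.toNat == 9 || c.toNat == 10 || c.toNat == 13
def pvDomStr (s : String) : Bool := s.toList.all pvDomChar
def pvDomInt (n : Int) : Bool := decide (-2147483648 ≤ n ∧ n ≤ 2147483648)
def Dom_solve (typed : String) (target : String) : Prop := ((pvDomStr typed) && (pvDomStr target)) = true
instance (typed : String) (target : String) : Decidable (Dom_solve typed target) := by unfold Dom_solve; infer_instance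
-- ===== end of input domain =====

-- B replaces A's two-pointer curr/next state machine by run-length encoding both
-- strings and comparing the run lists (objective: simpler). Return value only; no mutation.

-- ===== PORT A =====
-- A's main `while i1 < n` loop: state (i1, i2, curr) kept as the suffixes
-- ts = typed[i1:], gs = target[i2:] (next = head of gs) and curr; the two `break`s
-- merge with the post-loop `if i2 < m` check and the second while, which is the gs = [] case.
def solveLoop : List Char → List Char → Char → Bool
  | ts, [], curr => ts.all (fun c => c == curr)            -- i2 ≥ m: trailing typed must all be curr
  | [], _ :: _, _ => false                                 -- i1 ≥ n with i2 < m
  | c :: ts', x :: gs', curr =>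
    if curr == x then
      match ts' with
      | [] => false                                        -- i1 += 1; i1 ≥ n, i2 < m
      | c' :: r => if (c' == curr) = false then false else solveLoop (c' :: r) gs' x
    else if c == curr then solveLoop ts' (x :: gs') curr
    else if c == x then solveLoop (c :: ts') gs' x
    else false
termination_by ts gs _ => ts.length + gs.length
decreasing_by all_goals simp only [List.length_cons]; omega

def solve (typed : String) (target : String) : Bool :=
  let t := typed.toList
  let g := target.toList
  if t = [] ∧ g = [] then true
  else if g = [] then false
  else
    let n := t.length
    let m := g.length
    if n < m then false
    else
      match t, g with
      | t0 :: _, g0 :: g' =>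
        if (t0 == g0) = false then false
        else if m = 1 then ((PySem.Set.ofList t).length == 1)   -- len(set(typed)) == 1
        else solveLoop t g' g0
      | _, _ => false                                      -- unreachable: t ≠ [] and g ≠ [] here

-- ===== PORT B =====
-- Source B's rle loop: fold appending to / merging with the END of the run list.
def rleStep (runs : List (Char × Int)) (c : Char) : List (Char × Int) :=
  match runs.getLast? with
  | some (d, k) => if d == c then runs.dropLast ++ [(c, k + 1)] else runs ++ [(c, 1)]
  | none => [(c, 1)]

def rle (s : List Char) : List (Char × Int) := s.foldl rleStep []

def checkRuns (r1 r2 : List (Char × Int)) : Bool :=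
  (r1.length == r2.length) &&
    (r1.zip r2).all (fun p => (p.1.1 == p.2.1) && decide (p.1.2 ≥ p.2.2))

def solve_alt (typed : String) (target : String) : Bool :=
  checkRuns (rle typed.toList) (rle target.toList)

-- ===== PRECONDITION & SPEC =====
def Spec_solve (typed : String) (target : String) (out : Bool) : Prop := out = solve_alt typed target
instance (typed : String) (target : String) (out : Bool) : Decidable (Spec_solve typed target out) := by unfold Spec_solve; infer_instance

-- ===== CLAIM (what is proved, stated in full; the proofs are below) =====
def Claim_equal_solve : Prop := ∀ (typed : String) (target : String), Dom_solve typed target → Spec_solve typed target (solve typed target)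

-- ===== LEMMAS AND PROOFS =====

-- Cons-directed run-length scan: current run char c with count k, rest of the string.
def scanR : Char → Int → List Char → List (Char × Int)
  | c, k, [] => [(c, k)]
  | c, k, d :: u => if d == c then scanR c (k + 1) u else (c, k) :: scanR d 1 u

def leadC : Char → List Char → Int
  | _, [] => 0
  | c, d :: u => if d == c then leadC c u + 1 else 0

def tailR : Char → List Char → List (Char × Int)
  | _, [] => []
  | c, d :: u => if d == c then tailR c u else scanR d 1 u

theorem scanR_eq (c : Char) (k : Int) (u : List Char) :
    scanR c k u = (c, k + leadC c u) :: tailR c u := by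
  induction u generalizing k with
  | nil => simp [scanR, leadC, tailR]
  | cons d u ih =>
    by_cases h : d = c
    · subst h
      simp only [scanR, leadC, tailR, beq_self_eq_true, if_true, ih]
      congr 2
      omega
    · simp [scanR, leadC, tailR, h]

theorem leadC_nonneg (c : Char) (u : List Char) : 0 ≤ leadC c u := by
  induction u with
  | nil => simp [leadC]
  | cons d u ih => by_cases h : d = c <;> simp [leadC, h] <;> omega

theorem tailR_eq_nil (c : Char) (u : List Char) :
    (tailR c u = []) ↔ (u.all (fun d => d == c) = true) := by
  induction u with
  | nil => simp [tailR]
  | cons d u ih =>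
    by_cases h : d = c
    · simpa [tailR, h] using ih
    · simp [tailR, h, scanR_eq]

theorem rle_fold (s : List Char) (pre : List (Char × Int)) (c : Char) (k : Int) :
    List.foldl rleStep (pre ++ [(c, k)]) s = pre ++ scanR c k s := by
  induction s generalizing pre c k with
  | nil => simp [scanR]
  | cons d s ih =>
    by_cases h : d = c
    · subst h
      simp only [List.foldl_cons, rleStep, List.getLast?_concat, List.dropLast_concat,
        beq_self_eq_true, if_true]
      rw [ih]
      simp [scanR]
    · have hb : (c == d) = false := by simp [Ne.symm h]
      have hb' : (d == c) = false := by simp [h]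
      simp only [List.foldl_cons, rleStep, List.getLast?_concat, List.dropLast_concat, hb,
        Bool.false_eq_true, if_false]
      rw [ih]
      simp [scanR, hb']

theorem rle_nil : rle [] = [] := rfl

theorem rle_cons (c : Char) (s : List Char) : rle (c :: s) = scanR c 1 s := by
  have h0 : rleStep [] c = [(c, 1)] := rfl
  have := rle_fold s [] c 1
  simpa [rle, h0] using this

theorem checkRuns_nil_nil : checkRuns [] [] = true := rfl

theorem checkRuns_nil_cons (x : Char × Int) (r : List (Char × Int)) :
    checkRuns [] (x :: r) = false := by simp [checkRuns]

theorem checkRuns_cons_nil (x : Char × Int) (r : List (Char × Int)) :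
    checkRuns (x :: r) [] = false := by simp [checkRuns]

theorem checkRuns_cons (c d : Char) (j k : Int) (r1 r2 : List (Char × Int)) :
    checkRuns ((c, j) :: r1) ((d, k) :: r2) =
      (((c == d) && decide (j ≥ k)) && checkRuns r1 r2) := by
  simp only [checkRuns, List.length_cons, List.zip_cons_cons, List.all_cons]
  cases hcd : (c == d) <;> cases hjk : decide (j ≥ k) <;>
    cases hl : (r1.length == r2.length) <;> simp [hcd, hjk, hl]

theorem checkRuns_nil_right (r : List (Char × Int)) :
    (checkRuns r [] = true) ↔ r = [] := by
  cases r with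
  | nil => simp [checkRuns_nil_nil]
  | cons x r => simp [checkRuns_cons_nil]

def sumC : List (Char × Int) → Int
  | [] => 0
  | (_, k) :: r => k + sumC r

theorem sumC_scanR (c : Char) (k : Int) (u : List Char) :
    sumC (scanR c k u) = k + u.length := by
  induction u generalizing c k with
  | nil => simp [scanR, sumC]
  | cons d u ih =>
    by_cases h : d = c
    · subst h
      simp only [scanR, beq_self_eq_true, if_true, ih, List.length_cons]
      push_cast
      omega
    · simp only [scanR, h]
      rw [if_neg (by simp [h])]
      simp only [sumC, ih, List.length_cons]
      push_cast
      omega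

theorem checkRuns_sum (r1 r2 : List (Char × Int)) (h : checkRuns r1 r2 = true) :
    sumC r2 ≤ sumC r1 := by
  induction r1 generalizing r2 with
  | nil =>
    cases r2 with
    | nil => simp [sumC]
    | cons x r2 => simp [checkRuns_nil_cons] at h
  | cons x r1 ih =>
    cases r2 with
    | nil => simp [checkRuns_cons_nil] at h
    | cons y r2 =>
      obtain ⟨c, j⟩ := x
      obtain ⟨d, k⟩ := y
      rw [checkRuns_cons] at h
      simp only [Bool.and_eq_true, decide_eq_true_eq] at h
      have := ih r2 h.2
      simp only [sumC]
      omega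

-- len(set(t0 :: t')) = 1  ↔  every char of t' equals t0
theorem setLen_one (t0 : Char) (t' : List Char) :
    ((PySem.Set.ofList (t0 :: t')).length = 1) ↔ ∀ c ∈ t', c = t0 := by
  constructor
  · intro h c hc
    have hmem : c ∈ PySem.Set.ofList (t0 :: t') := by
      rw [PySem.Set.mem_ofList]; exact List.mem_cons_of_mem _ hc
    have hmem0 : t0 ∈ PySem.Set.ofList (t0 :: t') := by
      rw [PySem.Set.mem_ofList]; exact List.mem_cons_self
    obtain ⟨a, ha⟩ := List.length_eq_one_iff.mp h
    rw [ha] at hmem hmem0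
    simp at hmem hmem0
    rw [hmem, hmem0]
  · intro h
    have hall : ∀ c ∈ PySem.Set.ofList (t0 :: t'), c = t0 := by
      intro c hc
      rw [PySem.Set.mem_ofList] at hc
      rcases List.mem_cons.mp hc with h0 | h1
      · exact h0
      · exact h c h1
    have hnd : (PySem.Set.ofList (t0 :: t')).Nodup := PySem.Set.nodup_ofList _
    have hmem0 : t0 ∈ PySem.Set.ofList (t0 :: t') := by
      rw [PySem.Set.mem_ofList]; exact List.mem_cons_self
    cases hs : PySem.Set.ofList (t0 :: t') with
    | nil => rw [hs] at hmem0; simp at hmem0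
    | cons a l =>
      cases l with
      | nil => simp
      | cons b l =>
        exfalso
        rw [hs] at hall hnd
        have ha : a = t0 := hall a (by simp)
        have hb : b = t0 := hall b (by simp)
        rw [ha, hb] at hnd
        simp at hnd

-- The loop invariant function: what solveLoop computes, in run-length terms.
def G (ts gs : List Char) (curr : Char) : Bool :=
  (match gs with
   | [] => true
   | x :: _ => if x == curr then decide (leadC curr gs < leadC curr ts) else true)
  && checkRuns (tailR curr ts) (tailR curr gs)

theorem solveLoop_eq_G (N : Nat) :
    ∀ (ts gs : List Char) (curr : Char), ts.length + gs.length ≤ N →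
      (gs.head? = some curr → ts.head? = some curr) →
      solveLoop ts gs curr = G ts gs curr := by
  induction N with
  | zero =>
    intro ts gs curr hN hinv
    have : ts = [] ∧ gs = [] := by
      constructor <;> [cases ts; cases gs] <;> simp_all
    obtain ⟨h1, h2⟩ := this
    subst h1; subst h2
    simp [solveLoop, G, tailR, checkRuns_nil_nil]
  | succ N ih =>
    intro ts gs curr hN hinv
    match ts, gs with
    | ts, [] =>
      -- tail phase: all remaining typed chars must equal curr
      simp only [solveLoop, G, tailR]
      cases hall : ts.all (fun c => c == curr)
      · have : ¬ (tailR curr ts = []) := by rw [tailR_eq_nil]; simp [hall]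
        cases hc : checkRuns (tailR curr ts) []
        · simp
        · exact absurd ((checkRuns_nil_right _).mp hc) this
      · have : tailR curr ts = [] := (tailR_eq_nil _ _).mpr hall
        simp [this, checkRuns_nil_nil]
    | [], x :: gs' =>
      have hx : ¬ (x = curr) := by
        intro h
        have := hinv (by simp [h])
        simp at this
      simp only [solveLoop, G, tailR, List.head?_cons]
      rw [if_neg (by simp [hx]), scanR_eq]
      simp [hx, checkRuns_nil_cons]
    | c :: ts', x :: gs' =>
      have hN' : ts'.length + gs'.length ≤ N := by
        simp only [List.length_cons] at hN; omega
      by_cases hcx : curr = x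
      · -- ongoing run: target's current run continues
        subst hcx
        have hc : c = curr := by simpa using hinv (by simp)
        subst hc
        rw [solveLoop.eq_def]
        simp only [beq_self_eq_true, if_true]
        have hGts : tailR c (c :: ts') = tailR c ts' := by simp [tailR]
        have hGgs : tailR c (c :: gs') = tailR c gs' := by simp [tailR]
        match ts' with
        | [] =>
          show false = G (c :: ([] : List Char)) (c :: gs') c
          have hfalse : decide (leadC c (c :: gs') < leadC c (c :: ([] : List Char))) = false := by
            rw [decide_eq_false_iff_not]
            have := leadC_nonneg c gs'
            simp only [leadC, beq_self_eq_true, if_true]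
            omega
          simp only [G, List.head?_cons, beq_self_eq_true, if_true, hfalse, Bool.false_and]
        | c' :: r =>
          by_cases hc' : c' = c
          · subst hc'
            show (if (c' == c') = false then false else solveLoop (c' :: r) gs' c') =
              G (c' :: c' :: r) (c' :: gs') c'
            rw [if_neg (by simp)]
            have hinv' : gs'.head? = some c' → (c' :: r).head? = some c' := by
              intro _; rfl
            rw [ih (c' :: r) gs' c' hN' hinv']
            have hGts' : tailR c' (c' :: r) = tailR c' r := by simp [tailR]
            cases gs' with
            | nil =>
              have htrue : decide (leadC c' (c' :: ([] : List Char)) < leadC c' (c' :: c' :: r)) = true := by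
                rw [decide_eq_true_eq]
                have := leadC_nonneg c' r
                simp only [leadC, beq_self_eq_true, if_true]
                omega
              simp only [G, List.head?_cons, beq_self_eq_true, if_true, htrue, Bool.true_and,
                hGts, hGgs, tailR]
            | cons y gs'' =>
              by_cases hy : y = c'
              · subst hy
                have hiff : decide (leadC y (y :: y :: gs'') < leadC y (y :: y :: r)) =
                    decide (leadC y (y :: gs'') < leadC y (y :: r)) := by
                  have e1 : leadC y (y :: y :: gs'') = leadC y (y :: gs'') + 1 := by
                    simp [leadC]
                  have e2 : leadC y (y :: y :: r) = leadC y (y :: r) + 1 := by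
                    simp [leadC]
                  rw [e1, e2]
                  by_cases hlt : leadC y (y :: gs'') < leadC y (y :: r)
                  · rw [decide_eq_true (by omega), decide_eq_true (by omega)]
                  · rw [decide_eq_false (by omega), decide_eq_false (by omega)]
                simp only [G, List.head?_cons, beq_self_eq_true, if_true, hiff, hGts, hGgs, hGts']
              · have hyb : (y == c') = false := by simp [hy]
                have htrue : decide (leadC c' (c' :: y :: gs'') < leadC c' (c' :: c' :: r)) = true := by
                  rw [decide_eq_true_eq]
                  have := leadC_nonneg c' r
                  simp only [leadC, beq_self_eq_true, if_true, hyb, Bool.false_eq_true, if_false]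
                  omega
                simp only [G, List.head?_cons, beq_self_eq_true, if_true, hyb,
                  Bool.false_eq_true, if_false, htrue, Bool.true_and, hGts, hGgs, hGts']
          · have hc'b : (c' == c) = false := by simp [hc']
            show (if (c' == c) = false then false else solveLoop (c' :: r) gs' c) =
              G (c :: c' :: r) (c :: gs') c
            rw [if_pos (by simp [hc'b])]
            have hfalse : decide (leadC c (c :: gs') < leadC c (c :: c' :: r)) = false := by
              rw [decide_eq_false_iff_not]
              have := leadC_nonneg c gs'
              simp only [leadC, beq_self_eq_true, if_true, hc'b, Bool.false_eq_true, if_false]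
              omega
            simp only [G, List.head?_cons, beq_self_eq_true, if_true, hfalse, Bool.false_and]
      · -- curr ≠ x: target's current run has ended
        have hxb : (curr == x) = false := by simp [hcx]
        have hxb' : (x == curr) = false := by
          rw [beq_eq_false_iff_ne]
          intro h
          exact hcx h.symm
        rw [solveLoop.eq_def]
        simp only [hxb, Bool.false_eq_true, if_false]
        by_cases hc : c = curr
        · subst hc
          rw [if_pos (by simp)]
          have hinv' : (x :: gs').head? = some c → ts'.head? = some c := by
            intro h
            simp at h
            exact absurd h.symm hcx
          have hN'' : ts'.length + (x :: gs').length ≤ N := by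
            simp only [List.length_cons] at hN ⊢; omega
          rw [ih ts' (x :: gs') c hN'' hinv']
          have hGts : tailR c (c :: ts') = tailR c ts' := by simp [tailR]
          simp only [G, List.head?_cons, hxb', Bool.false_eq_true, if_false, hGts]
        · have hcb : (c == curr) = false := by simp [hc]
          rw [if_neg (by simp [hcb])]
          have hTts : tailR curr (c :: ts') = scanR c 1 ts' := by simp [tailR, hcb]
          have hTgs : tailR curr (x :: gs') = scanR x 1 gs' := by simp [tailR, hxb']
          by_cases hcx2 : c = x
          · subst hcx2
            rw [if_pos (by simp)]
            have hinv' : gs'.head? = some c → (c :: ts').head? = some c := by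
              intro _; rfl
            have hN'' : (c :: ts').length + gs'.length ≤ N := by
              simp only [List.length_cons] at hN ⊢; omega
            rw [ih (c :: ts') gs' c hN'' hinv']
            rw [G, hTts, hTgs, scanR_eq, scanR_eq, checkRuns_cons]
            simp only [List.head?_cons, hxb', Bool.false_eq_true, if_false, Bool.true_and,
              beq_self_eq_true]
            have hGts : tailR c (c :: ts') = tailR c ts' := by simp [tailR]
            cases gs' with
            | nil =>
              have htrue : decide ((1 : Int) + leadC c ts' ≥ 1 + leadC c ([] : List Char)) = true := by
                rw [decide_eq_true_eq]
                have := leadC_nonneg c ts'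
                simp only [leadC]
                omega
              simp only [G, htrue, Bool.true_and, hGts, tailR]
              simp
            | cons y gs'' =>
              by_cases hy : y = c
              · subst hy
                have hiff : decide ((1 : Int) + leadC y ts' ≥ 1 + leadC y (y :: gs'')) =
                    decide (leadC y (y :: gs'') < leadC y (y :: ts')) := by
                  have e1 : leadC y (y :: ts') = leadC y ts' + 1 := by simp [leadC]
                  rw [e1]
                  by_cases hlt : leadC y (y :: gs'') < leadC y ts' + 1
                  · rw [decide_eq_true (by omega), decide_eq_true (by omega)]
                  · rw [decide_eq_false (by omega), decide_eq_false (by omega)]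
                simp only [G, List.head?_cons, beq_self_eq_true, if_true, hiff, hGts]
              · have hyb : (y == c) = false := by simp [hy]
                have htrue : decide ((1 : Int) + leadC c ts' ≥ 1 + leadC c (y :: gs'')) = true := by
                  rw [decide_eq_true_eq]
                  have := leadC_nonneg c ts'
                  simp only [leadC, hyb, Bool.false_eq_true, if_false]
                  omega
                simp only [G, List.head?_cons, hyb, Bool.false_eq_true, if_false, htrue,
                  Bool.true_and, hGts]
          · have hcx2b : (c == x) = false := by simp [hcx2]
            rw [if_neg (by simp [hcx2b])]
            rw [G, hTts, hTgs, scanR_eq, scanR_eq, checkRuns_cons]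
            simp only [List.head?_cons, hxb', Bool.false_eq_true, if_false, Bool.true_and,
              hcx2b, Bool.false_and]

-- A = B, stated over the character lists of the two strings
theorem solve_eq_strings (typed target : String) :
    solve typed target = checkRuns (rle typed.toList) (rle target.toList) := by
  cases hg : target.toList with
  | nil =>
    cases ht : typed.toList with
    | nil => simp [solve, ht, hg, rle_nil, checkRuns_nil_nil]
    | cons t0 t' =>
      simp only [solve, ht, hg, rle_nil, rle_cons, scanR_eq]
      simp [checkRuns_cons_nil]
  | cons g0 g' =>
    cases ht : typed.toList with
    | nil =>
      simp only [solve, ht, hg, rle_nil, rle_cons, scanR_eq]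
      rw [if_neg (by simp), if_neg (by simp), if_pos (by simp)]
      simp [checkRuns_nil_cons]
    | cons t0 t' =>
      simp only [solve, ht, hg]
      rw [if_neg (by simp), if_neg (by simp)]
      by_cases hnm : (t0 :: t').length < (g0 :: g').length
      · rw [if_pos hnm]
        cases hB : checkRuns (rle (t0 :: t')) (rle (g0 :: g'))
        · rfl
        · exfalso
          have hs := checkRuns_sum _ _ hB
          rw [rle_cons, rle_cons, sumC_scanR, sumC_scanR] at hs
          simp only [List.length_cons] at hnm
          omega
      · rw [if_neg hnm]
        show (if (t0 == g0) = false then false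
              else if (g0 :: g').length = 1 then (((PySem.Set.ofList (t0 :: t')).length == 1) : Bool)
              else solveLoop (t0 :: t') g' g0) = checkRuns (rle (t0 :: t')) (rle (g0 :: g'))
        by_cases ht0 : t0 = g0
        · subst ht0
          rw [if_neg (by simp), rle_cons, rle_cons]
          by_cases hm : (t0 :: g').length = 1
          · rw [if_pos hm]
            have hg' : g' = [] := by simpa using hm
            subst hg'
            rw [scanR_eq, show scanR t0 1 [] = [(t0, 1)] from rfl, checkRuns_cons]
            have hge : decide ((1 : Int) + leadC t0 t' ≥ 1) = true := by
              rw [decide_eq_true_eq]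
              have := leadC_nonneg t0 t'
              omega
            simp only [beq_self_eq_true, hge, Bool.and_self, Bool.true_and]
            cases hall : t'.all (fun d => d == t0)
            · have h1 : ¬ (tailR t0 t' = []) := by rw [tailR_eq_nil]; simp [hall]
              have h2 : ¬ ((PySem.Set.ofList (t0 :: t')).length = 1) := by
                rw [setLen_one]
                intro hforall
                have hco : t'.all (fun d => d == t0) = true := by
                  rw [List.all_eq_true]
                  intro d hd
                  simpa using hforall d hd
                simp [hall] at hco
              cases hc2 : checkRuns (tailR t0 t') []
              · simp [h2]
              · exact absurd ((checkRuns_nil_right _).mp hc2) h1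
            · have h1 : tailR t0 t' = [] := (tailR_eq_nil _ _).mpr hall
              have h2 : (PySem.Set.ofList (t0 :: t')).length = 1 := by
                rw [setLen_one]
                intro cch hc
                simpa using List.all_eq_true.mp hall cch hc
              simp [h1, h2, checkRuns_nil_nil]
          · rw [if_neg hm]
            have hg' : g' ≠ [] := by
              intro h
              rw [h] at hm
              simp at hm
            rw [solveLoop_eq_G ((t0 :: t').length + g'.length) (t0 :: t') g' t0 le_rfl
                (fun _ => rfl)]
            cases g' with
            | nil => exact absurd rfl hg'
            | cons g1 g'' =>
              rw [scanR_eq, scanR_eq, checkRuns_cons]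
              have hGt : tailR t0 (t0 :: t') = tailR t0 t' := by simp [tailR]
              by_cases hg1 : g1 = t0
              · subst hg1
                have hiff : decide (leadC g1 (g1 :: g'') < leadC g1 (g1 :: t')) =
                    decide ((1 : Int) + leadC g1 t' ≥ 1 + leadC g1 (g1 :: g'')) := by
                  have e1 : leadC g1 (g1 :: t') = leadC g1 t' + 1 := by simp [leadC]
                  rw [e1]
                  by_cases hlt : leadC g1 (g1 :: g'') < leadC g1 t' + 1
                  · rw [decide_eq_true (by omega), decide_eq_true (by omega)]
                  · rw [decide_eq_false (by omega), decide_eq_false (by omega)]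
                simp only [G, List.head?_cons, beq_self_eq_true, if_true, hiff, hGt,
                  Bool.true_and]
              · have hg1b : (g1 == t0) = false := by simp [hg1]
                have htrue : decide ((1 : Int) + leadC t0 t' ≥ 1 + leadC t0 (g1 :: g'')) = true := by
                  rw [decide_eq_true_eq]
                  have := leadC_nonneg t0 t'
                  simp only [leadC, hg1b, Bool.false_eq_true, if_false]
                  omega
                simp only [G, List.head?_cons, hg1b, Bool.false_eq_true, if_false, htrue,
                  Bool.true_and, hGt]
                simp
        · have ht0b : (t0 == g0) = false := by simp [ht0]
          rw [if_pos ht0b, rle_cons, rle_cons, scanR_eq, scanR_eq, checkRuns_cons]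
          simp [ht0b]

-- ===== VERDICT (by name: the statement is the Claim_ definition above) =====
theorem solve_spec : Claim_equal_solve := by
  intro typed target _
  unfold Spec_solve solve_alt
  exact solve_eq_strings typed target
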